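-- pv_equiv track=rewrite | github.com/R-Strange/CodeWars | twice_linear.py | dbl_linear_old
-- ===== SOURCE A (Python) =====
-- def dbl_linear_old(n):
--     y = lambda x: (2 * x) + 1
--     z = lambda x: (3 * x) + 1
--
--     u = [1]
--     i = 0
--
--     while i < n+1:
--         x = u[i]
--         u.append(y(x))
--         u.append(z(x))
--         u = sorted(list(set(u)))
--         i += 1
--
--     return u[n]
-- ===== SOURCE B (Python) =====
-- def dbl_linear_old(n):
--     u = [1]
--     i = j = 0
--     for _ in range(n):
--         a = 2 * u[i] + 1
--         b = 3 * u[j] + 1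
--         m = min(a, b)
--         u.append(m)
--         if a == m:
--             i += 1
--         if b == m:
--             j += 1
--     return u[n]
-- ===== Notes on version B (the rewrite author's own statement) =====
-- stated objective: faster
-- what changed: Replaced A's repeated append/dedup/re-sort of the whole list each iteration with a Dijkstra-style two-pointer merge that emits the sequence in sorted order in one pass.
-- outside the precondition, e.g. on dbl_linear_old(-2): A raises IndexError, B raises IndexError
import Mathlib
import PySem

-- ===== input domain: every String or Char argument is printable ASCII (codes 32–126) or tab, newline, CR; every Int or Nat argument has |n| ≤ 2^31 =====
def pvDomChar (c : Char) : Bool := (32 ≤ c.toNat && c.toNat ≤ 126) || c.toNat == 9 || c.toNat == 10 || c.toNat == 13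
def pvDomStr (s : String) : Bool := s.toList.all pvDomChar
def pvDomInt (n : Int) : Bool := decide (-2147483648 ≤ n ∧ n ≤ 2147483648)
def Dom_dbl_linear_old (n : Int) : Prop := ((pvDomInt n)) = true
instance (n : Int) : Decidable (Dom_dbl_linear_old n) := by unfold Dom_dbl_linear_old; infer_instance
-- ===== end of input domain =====

-- B replaces A's per-step append/dedup/re-sort of the whole list with a two-pointer
-- merge that emits the sequence already sorted, one element per step (objective: faster).

-- ===== PORT A =====
-- hand port of 'sorted(list(set(u)))' (exact: it is the strictly increasing enumeration
-- of u's distinct elements; PySem.List.sorted (PySem.Set.ofList u) is the same list but its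
-- quadratic model would make the port unevaluable on the tester's larger inputs):
-- mergesort by ≤, then drop adjacent duplicates
def dblLinearOldDedupAdj : List Int → List Int
  | [] => []
  | [x] => [x]
  | x :: y :: rest => if x = y then dblLinearOldDedupAdj (y :: rest) else x :: dblLinearOldDedupAdj (y :: rest)

def dblLinearOldSortedSet (u : List Int) : List Int :=
  dblLinearOldDedupAdj (u.mergeSort (fun a b => decide (a ≤ b)))

-- the while loop of A: fuel = number of remaining iterations, i = A's loop index
def dblLinearOldLoopA : List Int → Int → Nat → List Int
  | u, _, 0 => u
  | u, i, Nat.succ f =>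
    let x := PySem.List.pyGetD u i 0
    let u := u ++ [2 * x + 1]
    let u := u ++ [3 * x + 1]
    let u := dblLinearOldSortedSet u
    dblLinearOldLoopA u (i + 1) f

def dbl_linear_old (n : Int) : Int :=
  let u := dblLinearOldLoopA [1] 0 (n + 1).toNat
  PySem.List.pyGetD u n 0

-- ===== PORT B =====
-- the for loop of B: two read pointers i (for 2x+1) and j (for 3x+1)
def dblLinearOldLoopB : List Int → Int → Int → Nat → List Int
  | u, _, _, 0 => u
  | u, i, j, Nat.succ f =>
    let a := 2 * PySem.List.pyGetD u i 0 + 1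
    let b := 3 * PySem.List.pyGetD u j 0 + 1
    let m := min a b
    let u' := u ++ [m]
    let i' := if a = m then i + 1 else i
    let j' := if b = m then j + 1 else j
    dblLinearOldLoopB u' i' j' f

def dbl_linear_old_alt (n : Int) : Int :=
  let u := dblLinearOldLoopB [1] 0 0 n.toNat
  PySem.List.pyGetD u n 0

-- ===== PRECONDITION & SPEC =====
-- Pre_ excludes exactly n ≤ -2, where Python A raises IndexError on the final u[n].
def Pre_dbl_linear_old (n : Int) : Prop := -1 ≤ n
instance (n : Int) : Decidable (Pre_dbl_linear_old n) := by unfold Pre_dbl_linear_old; infer_instance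
def pvWitness_dbl_linear_old : Int := (5)
def Spec_dbl_linear_old (n : Int) (out : Int) : Prop := out = dbl_linear_old_alt n
instance (n : Int) (out : Int) : Decidable (Spec_dbl_linear_old n out) := by unfold Spec_dbl_linear_old; infer_instance

-- ===== CLAIM (what is proved, stated in full; the proofs are below) =====
def Claim_equal_dbl_linear_old : Prop := ∀ (n : Int), Dom_dbl_linear_old n → Pre_dbl_linear_old n → Spec_dbl_linear_old n (dbl_linear_old n)

-- ===== LEMMAS AND PROOFS =====

-- B's loop, one abstract step on the whole state
def pvBStep (s : List Int × Int × Int) : List Int × Int × Int :=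
  let a := 2 * PySem.List.pyGetD s.1 s.2.1 0 + 1
  let b := 3 * PySem.List.pyGetD s.1 s.2.2 0 + 1
  let m := min a b
  (s.1 ++ [m], (if a = m then s.2.1 + 1 else s.2.1), (if b = m then s.2.2 + 1 else s.2.2))

def pvBIter : Nat → List Int × Int × Int
  | 0 => ([1], 0, 0)
  | k + 1 => pvBStep (pvBIter k)

-- the twice-linear sequence, read off B's list
def pvT (k : Nat) : Int := (pvBIter k).1.getD k 0

-- A's loop body on the list alone (i = iteration count s)
def pvAStep (s : Nat) (u : List Int) : List Int :=
  let x := PySem.List.pyGetD u (s : Int) 0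
  dblLinearOldSortedSet (u ++ [2 * x + 1] ++ [3 * x + 1])

def pvAIter : Nat → List Int
  | 0 => [1]
  | s + 1 => pvAStep s (pvAIter s)

def pvBInv (k : Nat) : Prop :=
  (pvBIter k).1 = (List.range (k + 1)).map pvT ∧
  (∀ l, l < k → pvT l < pvT (l + 1)) ∧
  (∀ l, 0 < l → l ≤ k → ∃ p, p < l ∧ (pvT l = 2 * pvT p + 1 ∨ pvT l = 3 * pvT p + 1)) ∧
  (∃ iN jN : Nat, (pvBIter k).2.1 = (iN : Int) ∧ (pvBIter k).2.2 = (jN : Int) ∧ iN ≤ k ∧ jN ≤ k ∧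
    pvT k < 2 * pvT iN + 1 ∧ pvT k < 3 * pvT jN + 1 ∧
    (∀ l, l < iN → ∃ l', l' ≤ k ∧ pvT l' = 2 * pvT l + 1) ∧
    (∀ l, l < jN → ∃ l', l' ≤ k ∧ pvT l' = 3 * pvT l + 1))

theorem pvGetDMapRange (f : Nat → Int) (n l : Nat) (h : l < n) :
    ((List.range n).map f).getD l 0 = f l := by
  rw [List.getD_eq_getElem _ _ (by simpa using h)]
  simp

theorem pvBInv_all : ∀ k, pvBInv k := by
  intro k
  induction k with
  | zero =>
    refine ⟨by decide, by omega, by omega, 0, 0, rfl, rfl, le_rfl, le_rfl, by decide, by decide, by omega, by omega⟩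
  | succ k ih =>
    obtain ⟨hlist, hmono, hpar, iN, jN, hi, hj, hiNle, hjNle, hg2, hg3, hc2, hc3⟩ := ih
    have hga : PySem.List.pyGetD (pvBIter k).1 ((iN : Int)) 0 = pvT iN := by
      rw [PySem.List.pyGetD_natCast, hlist, pvGetDMapRange _ _ _ (by omega)]
    have hgb : PySem.List.pyGetD (pvBIter k).1 ((jN : Int)) 0 = pvT jN := by
      rw [PySem.List.pyGetD_natCast, hlist, pvGetDMapRange _ _ _ (by omega)]
    set a := 2 * pvT iN + 1 with ha_def
    set b := 3 * pvT jN + 1 with hb_def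
    set M := min a b with hM_def
    have hlist1 : (pvBIter (k+1)).1 = (pvBIter k).1 ++ [M] := by
      show (pvBStep (pvBIter k)).1 = _
      simp only [pvBStep, hi, hj, hga, hgb]
      rfl
    have hi1 : (pvBIter (k+1)).2.1 = if a = M then (iN : Int) + 1 else (iN : Int) := by
      show (pvBStep (pvBIter k)).2.1 = _
      simp only [pvBStep, hi, hj, hga, hgb]
      rfl
    have hj1 : (pvBIter (k+1)).2.2 = if b = M then (jN : Int) + 1 else (jN : Int) := by
      show (pvBStep (pvBIter k)).2.2 = _
      simp only [pvBStep, hi, hj, hga, hgb]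
      rfl
    have hTsucc : pvT (k+1) = M := by
      unfold pvT
      rw [hlist1, hlist]
      rw [List.getD_eq_getElem _ _ (by simp)]
      simp
    have hMa : M ≤ a := min_le_left _ _
    have hMb : M ≤ b := min_le_right _ _
    have hMab : M = a ∨ M = b := min_choice a b
    have hMgt : pvT k < M := lt_min hg2 hg3
    -- clause 1
    have hlist2 : (pvBIter (k+1)).1 = (List.range (k+2)).map pvT := by
      rw [hlist1, hlist, List.range_succ (n := k+1), List.map_append]
      simp [hTsucc]
    -- clause 2
    have hmono2 : ∀ l, l < k + 1 → pvT l < pvT (l + 1) := by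
      intro l hl
      rcases Nat.lt_succ_iff_lt_or_eq.mp hl with h | h
      · exact hmono l h
      · subst h; rw [hTsucc]; exact hMgt
    -- clause 3
    have hpar2 : ∀ l, 0 < l → l ≤ k + 1 → ∃ p, p < l ∧ (pvT l = 2 * pvT p + 1 ∨ pvT l = 3 * pvT p + 1) := by
      intro l h0 hl
      rcases Nat.lt_succ_iff_lt_or_eq.mp (Nat.lt_succ_of_le hl) with h | h
      · exact hpar l h0 (by omega)
      · subst h
        rcases hMab with h | h
        · exact ⟨iN, by omega, Or.inl (by rw [hTsucc, h])⟩
        · exact ⟨jN, by omega, Or.inr (by rw [hTsucc, h])⟩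
    refine ⟨hlist2, hmono2, hpar2, if a = M then iN + 1 else iN, if b = M then jN + 1 else jN,
      ?_, ?_, by split <;> omega, by split <;> omega, ?_, ?_, ?_, ?_⟩
    · rw [hi1]; split <;> push_cast <;> rfl
    · rw [hj1]; split <;> push_cast <;> rfl
    · -- pvT (k+1) < 2 * pvT (new i) + 1
      rw [hTsucc]
      split
      case isTrue h =>
        have : pvT iN < pvT (iN + 1) := hmono2 iN (by omega)
        omega
      case isFalse h =>
        have : M < a := lt_of_le_of_ne hMa (fun hh => h hh.symm)
        omega
    · rw [hTsucc]
      split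
      case isTrue h =>
        have : pvT jN < pvT (jN + 1) := hmono2 jN (by omega)
        omega
      case isFalse h =>
        have : M < b := lt_of_le_of_ne hMb (fun hh => h hh.symm)
        omega
    · -- completeness for 2x+1
      split
      case isTrue h =>
        intro l hl
        rcases Nat.lt_succ_iff_lt_or_eq.mp hl with h' | h'
        · obtain ⟨l', hl', he⟩ := hc2 l h'
          exact ⟨l', by omega, he⟩
        · subst h'
          exact ⟨k + 1, le_rfl, by rw [hTsucc, ← h]⟩
      case isFalse h =>
        intro l hl
        obtain ⟨l', hl', he⟩ := hc2 l hl
        exact ⟨l', by omega, he⟩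
    · split
      case isTrue h =>
        intro l hl
        rcases Nat.lt_succ_iff_lt_or_eq.mp hl with h' | h'
        · obtain ⟨l', hl', he⟩ := hc3 l h'
          exact ⟨l', by omega, he⟩
        · subst h'
          exact ⟨k + 1, le_rfl, by rw [hTsucc, ← h]⟩
      case isFalse h =>
        intro l hl
        obtain ⟨l', hl', he⟩ := hc3 l hl
        exact ⟨l', by omega, he⟩

theorem pvT_strictMono : StrictMono pvT :=
  strictMono_nat_of_lt_succ (fun l => (pvBInv_all (l+1)).2.1 l (Nat.lt_succ_self l))

theorem pvT_zero : pvT 0 = 1 := by rfl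

theorem pvT_ge : ∀ k : Nat, (k : Int) + 1 ≤ pvT k := by
  intro k
  induction k with
  | zero => rw [pvT_zero]; norm_num
  | succ k ih =>
    have h : pvT k < pvT (k + 1) := pvT_strictMono (by omega : k < k + 1)
    push_cast
    omega

theorem pvT_closure2 : ∀ l : Nat, ∃ l', pvT l' = 2 * pvT l + 1 := by
  intro l
  have hl := pvT_ge l
  have hk0 : (0:Int) ≤ 2 * pvT l := by omega
  have hkc : (((2 * pvT l).toNat : Nat) : Int) = 2 * pvT l := Int.toNat_of_nonneg hk0
  have hk := pvT_ge (2 * pvT l).toNat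
  obtain ⟨_, _, _, iN, jN, _, _, _, _, hg2, _, hc2, _⟩ := pvBInv_all (2 * pvT l).toNat
  have hlt : pvT l < pvT iN := by omega
  obtain ⟨l', _, he⟩ := hc2 l (pvT_strictMono.lt_iff_lt.mp hlt)
  exact ⟨l', he⟩

theorem pvT_closure3 : ∀ l : Nat, ∃ l', pvT l' = 3 * pvT l + 1 := by
  intro l
  have hl := pvT_ge l
  have hk0 : (0:Int) ≤ 3 * pvT l := by omega
  have hkc : (((3 * pvT l).toNat : Nat) : Int) = 3 * pvT l := Int.toNat_of_nonneg hk0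
  have hk := pvT_ge (3 * pvT l).toNat
  obtain ⟨_, _, _, iN, jN, _, _, _, _, _, hg3, _, hc3⟩ := pvBInv_all (3 * pvT l).toNat
  have hlt : pvT l < pvT jN := by omega
  obtain ⟨l', _, he⟩ := hc3 l (pvT_strictMono.lt_iff_lt.mp hlt)
  exact ⟨l', he⟩

theorem pvHeadEq (v : Int) (X' : List Int) (f : Nat → Int)
    (hpw : (v :: X').Pairwise (· < ·)) (hmono : ∀ p q : Nat, p < q → f p < f q)
    (h0 : f 0 ∈ v :: X') (hrngv : ∃ k, v = f k) : v = f 0 := by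
  rcases hrngv with ⟨k, hk⟩
  rcases List.mem_cons.mp h0 with h | h
  · exact h.symm
  · exfalso
    have hvlt : v < f 0 := (List.pairwise_cons.mp hpw).1 _ h
    have hle : f 0 ≤ f k := by
      rcases Nat.eq_zero_or_pos k with h' | h'
      · rw [h']
      · exact le_of_lt (hmono 0 k h')
    omega

-- a strictly sorted list whose elements all lie in the range of a strictly monotone f
-- and that contains f 0 … f L starts with exactly f 0 … f L
theorem pvSortedPrefix (L : Nat) : ∀ (X : List Int) (f : Nat → Int),
    X.Pairwise (· < ·) → (∀ p q : Nat, p < q → f p < f q) →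
    (∀ l, l ≤ L → f l ∈ X) → (∀ v, v ∈ X → ∃ k, v = f k) →
    (∀ l, l ≤ L → X.getD l 0 = f l) ∧ L < X.length := by
  induction L with
  | zero =>
    intro X f hpw hmono hmem hrng
    cases X with
    | nil => exact absurd (hmem 0 le_rfl) (by simp)
    | cons v X' =>
      have hv : v = f 0 :=
        pvHeadEq v X' f hpw hmono (hmem 0 le_rfl) (hrng v List.mem_cons_self)
      refine ⟨?_, by simp⟩
      intro l hl
      have : l = 0 := by omega
      subst this
      simpa using hv
  | succ L' ih =>
    intro X f hpw hmono hmem hrng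
    cases X with
    | nil => exact absurd (hmem 0 (by omega)) (by simp)
    | cons v X' =>
      have hv : v = f 0 :=
        pvHeadEq v X' f hpw hmono (hmem 0 (by omega)) (hrng v List.mem_cons_self)
      obtain ⟨hlt, hpw'⟩ := List.pairwise_cons.mp hpw
      have hmono' : ∀ p q : Nat, p < q → f (p+1) < f (q+1) := fun p q h => hmono _ _ (by omega)
      have hmem' : ∀ l, l ≤ L' → f (l+1) ∈ X' := by
        intro l hl
        have h1 : f (l+1) ∈ v :: X' := hmem (l+1) (by omega)
        rcases List.mem_cons.mp h1 with h | h
        · exfalso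
          have : f 0 < f (l+1) := hmono 0 (l+1) (by omega)
          omega
        · exact h
      have hrng' : ∀ w, w ∈ X' → ∃ k, w = f (k+1) := by
        intro w hw
        obtain ⟨k, hk⟩ := hrng w (List.mem_cons_of_mem _ hw)
        cases k with
        | zero =>
          exfalso
          have : v < w := hlt _ hw
          omega
        | succ k' => exact ⟨k', hk⟩
      obtain ⟨hget, hlen⟩ := ih X' (fun k => f (k+1)) hpw' hmono' hmem' hrng'
      refine ⟨?_, by simpa using Nat.succ_lt_succ hlen⟩
      intro l hl
      cases l with
      | zero => simpa using hv
      | succ l' => simpa using hget l' (by omega)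

theorem pvDedupAdj_subset : ∀ (xs : List Int) (v : Int), v ∈ dblLinearOldDedupAdj xs → v ∈ xs := by
  intro xs
  induction xs using dblLinearOldDedupAdj.induct with
  | case1 => intro v h; exact absurd h (by simp [dblLinearOldDedupAdj])
  | case2 x => intro v h; simpa [dblLinearOldDedupAdj] using h
  | case3 y rest ih =>
    intro v h
    rw [dblLinearOldDedupAdj, if_pos rfl] at h
    have := ih v h
    simp only [List.mem_cons] at this ⊢
    tauto
  | case4 x y rest hne ih =>
    intro v h
    rw [dblLinearOldDedupAdj, if_neg hne] at h
    rcases List.mem_cons.mp h with h | h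
    · exact List.mem_cons.mpr (Or.inl h)
    · have := ih v h
      simp only [List.mem_cons] at this ⊢
      tauto

theorem pvDedupAdj_mem : ∀ (xs : List Int), xs.Pairwise (· ≤ ·) →
    ∀ v ∈ xs, v ∈ dblLinearOldDedupAdj xs := by
  intro xs
  induction xs using dblLinearOldDedupAdj.induct with
  | case1 => intro _ v h; exact absurd h (by simp)
  | case2 x => intro _ v h; simpa [dblLinearOldDedupAdj] using h
  | case3 y rest ih =>
    intro hpw v hv
    rw [dblLinearOldDedupAdj, if_pos rfl]
    have hpw' : (y :: rest).Pairwise (· ≤ ·) := (List.pairwise_cons.mp hpw).2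
    rcases List.mem_cons.mp hv with h | h
    · exact ih hpw' v (by simp [h])
    · exact ih hpw' v h
  | case4 x y rest hne ih =>
    intro hpw v hv
    rw [dblLinearOldDedupAdj, if_neg hne]
    have hpw' : (y :: rest).Pairwise (· ≤ ·) := (List.pairwise_cons.mp hpw).2
    rcases List.mem_cons.mp hv with h | h
    · exact List.mem_cons.mpr (Or.inl h)
    · exact List.mem_cons.mpr (Or.inr (ih hpw' v h))

theorem pvDedupAdj_pairwise : ∀ (xs : List Int), xs.Pairwise (· ≤ ·) →
    (dblLinearOldDedupAdj xs).Pairwise (· < ·) := by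
  intro xs
  induction xs using dblLinearOldDedupAdj.induct with
  | case1 => intro _; simp [dblLinearOldDedupAdj]
  | case2 x => intro _; simp [dblLinearOldDedupAdj]
  | case3 y rest ih =>
    intro hpw
    rw [dblLinearOldDedupAdj, if_pos rfl]
    exact ih (List.pairwise_cons.mp hpw).2
  | case4 x y rest hne ih =>
    intro hpw
    obtain ⟨hle, hpw'⟩ := List.pairwise_cons.mp hpw
    rw [dblLinearOldDedupAdj, if_neg hne]
    refine List.pairwise_cons.mpr ⟨?_, ih hpw'⟩
    intro w hw
    have hwmem : w ∈ y :: rest := pvDedupAdj_subset _ _ hw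
    have hxy : x < y := lt_of_le_of_ne (hle y List.mem_cons_self) hne
    rcases List.mem_cons.mp hwmem with h | h
    · exact h ▸ hxy
    · have : y ≤ w := (List.pairwise_cons.mp hpw').1 w h
      omega

theorem pvMergeSortPairwise (u : List Int) :
    (u.mergeSort (fun a b => decide (a ≤ b))).Pairwise (· ≤ ·) := by
  have h := List.pairwise_mergeSort (le := fun a b : Int => decide (a ≤ b))
    (fun a b c hab hbc => by simp only [decide_eq_true_eq] at hab hbc ⊢; omega)
    (fun a b => by simp only [Bool.or_eq_true, decide_eq_true_eq]; omega) u
  exact h.imp (fun hab => of_decide_eq_true hab)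

theorem pvSortedSet_pairwise (u : List Int) : (dblLinearOldSortedSet u).Pairwise (· < ·) :=
  pvDedupAdj_pairwise _ (pvMergeSortPairwise u)

theorem pvSortedSet_mem (u : List Int) (v : Int) : v ∈ dblLinearOldSortedSet u ↔ v ∈ u := by
  constructor
  · intro h
    exact (List.mergeSort_perm u _).mem_iff.mp (pvDedupAdj_subset _ _ h)
  · intro h
    exact pvDedupAdj_mem _ (pvMergeSortPairwise u) v ((List.mergeSort_perm u _).mem_iff.mpr h)

def pvAInv (s : Nat) : Prop :=
  (pvAIter s).Pairwise (· < ·) ∧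
  (∀ v, v ∈ pvAIter s ↔ (v = 1 ∨ ∃ l, l < s ∧ (v = 2 * pvT l + 1 ∨ v = 3 * pvT l + 1))) ∧
  (∀ l, l ≤ s → (pvAIter s).getD l 0 = pvT l) ∧ s < (pvAIter s).length

theorem pvAInv_all : ∀ s, pvAInv s := by
  intro s
  induction s with
  | zero =>
    refine ⟨by simp [pvAIter], ?_, ?_, by simp [pvAIter]⟩
    · intro v
      constructor
      · intro hv; left; simpa [pvAIter] using hv
      · rintro (h | ⟨l, hl, _⟩)
        · simp [pvAIter, h]
        · omega
    · intro l hl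
      have : l = 0 := by omega
      subst this
      rfl
  | succ s ih =>
    obtain ⟨hpw, hmem, hpre, hlen⟩ := ih
    have hx : PySem.List.pyGetD (pvAIter s) (s : Int) 0 = pvT s := by
      rw [PySem.List.pyGetD_natCast]
      exact hpre s le_rfl
    have hstep : pvAIter (s+1) =
        dblLinearOldSortedSet (pvAIter s ++ [2 * pvT s + 1] ++ [3 * pvT s + 1]) := by
      simp only [pvAIter, pvAStep, hx]
    have hpw1 : (pvAIter (s+1)).Pairwise (· < ·) := by
      rw [hstep]
      exact pvSortedSet_pairwise _
    have hmem1 : ∀ v, v ∈ pvAIter (s+1) ↔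
        (v = 1 ∨ ∃ l, l < s + 1 ∧ (v = 2 * pvT l + 1 ∨ v = 3 * pvT l + 1)) := by
      intro v
      rw [hstep, pvSortedSet_mem]
      simp only [List.mem_append, List.mem_singleton]
      rw [hmem v]
      constructor
      · rintro (((h1 | ⟨l, hl, h⟩) | hy) | hz)
        · exact Or.inl h1
        · exact Or.inr ⟨l, by omega, h⟩
        · exact Or.inr ⟨s, by omega, Or.inl hy⟩
        · exact Or.inr ⟨s, by omega, Or.inr hz⟩
      · rintro (h1 | ⟨l, hl, h | h⟩)
        · exact Or.inl (Or.inl (Or.inl h1))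
        · rcases Nat.lt_succ_iff_lt_or_eq.mp hl with h' | h'
          · exact Or.inl (Or.inl (Or.inr ⟨l, h', Or.inl h⟩))
          · subst h'; exact Or.inl (Or.inr h)
        · rcases Nat.lt_succ_iff_lt_or_eq.mp hl with h' | h'
          · exact Or.inl (Or.inl (Or.inr ⟨l, h', Or.inr h⟩))
          · subst h'; exact Or.inr h
    have hmemf : ∀ l, l ≤ s + 1 → pvT l ∈ pvAIter (s+1) := by
      intro l hl
      rw [hmem1]
      cases l with
      | zero => exact Or.inl pvT_zero
      | succ l0 =>
        obtain ⟨p, hp, hcase⟩ := (pvBInv_all (l0+1)).2.2.1 (l0+1) (by omega) le_rfl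
        exact Or.inr ⟨p, by omega, hcase⟩
    have hrng : ∀ v, v ∈ pvAIter (s+1) → ∃ k, v = pvT k := by
      intro v hv
      rcases (hmem1 v).mp hv with h1 | ⟨l, _, h | h⟩
      · exact ⟨0, by rw [h1, pvT_zero]⟩
      · obtain ⟨l', he⟩ := pvT_closure2 l
        exact ⟨l', by rw [h, he]⟩
      · obtain ⟨l', he⟩ := pvT_closure3 l
        exact ⟨l', by rw [h, he]⟩
    obtain ⟨hget, hlen1⟩ := pvSortedPrefix (s+1) (pvAIter (s+1)) pvT hpw1
      (fun p q h => pvT_strictMono h) hmemf hrng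
    exact ⟨hpw1, hmem1, hget, hlen1⟩

theorem pvLoopA_eq : ∀ (f s : Nat), dblLinearOldLoopA (pvAIter s) (s : Int) f = pvAIter (s + f) := by
  intro f
  induction f with
  | zero => intro s; rfl
  | succ f ih =>
    intro s
    have h1 : dblLinearOldLoopA (pvAIter s) (s : Int) (f + 1)
        = dblLinearOldLoopA (pvAIter (s+1)) ((s+1 : Nat) : Int) f := by
      simp only [dblLinearOldLoopA, pvAIter, pvAStep]
      push_cast
      rfl
    have h2 : s + 1 + f = s + (f + 1) := by omega
    rw [h1, ih (s+1), h2]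

theorem pvLoopB_eq : ∀ (f k : Nat),
    dblLinearOldLoopB (pvBIter k).1 (pvBIter k).2.1 (pvBIter k).2.2 f = (pvBIter (k + f)).1 := by
  intro f
  induction f with
  | zero => intro k; rfl
  | succ f ih =>
    intro k
    have h1 : dblLinearOldLoopB (pvBIter k).1 (pvBIter k).2.1 (pvBIter k).2.2 (f + 1)
        = dblLinearOldLoopB (pvBIter (k+1)).1 (pvBIter (k+1)).2.1 (pvBIter (k+1)).2.2 f := by
      simp only [dblLinearOldLoopB, pvBIter, pvBStep]
    have h2 : k + 1 + f = k + (f + 1) := by omega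
    rw [h1, ih (k+1), h2]

-- ===== VERDICT (by name: the statement is the Claim_ definition above) =====
theorem dbl_linear_old_spec : Claim_equal_dbl_linear_old := by
  intro n _ hpre
  unfold Spec_dbl_linear_old
  by_cases h0 : 0 ≤ n
  · obtain ⟨m, hm⟩ : ∃ m : Nat, n = (m : Int) := ⟨n.toNat, by omega⟩
    subst hm
    have h1 : ((m : Int) + 1).toNat = m + 1 := by omega
    have h2 : ((m : Int)).toNat = m := by omega
    show PySem.List.pyGetD (dblLinearOldLoopA [1] 0 ((m : Int) + 1).toNat) (m : Int) 0
        = PySem.List.pyGetD (dblLinearOldLoopB [1] 0 0 ((m : Int)).toNat) (m : Int) 0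
    rw [h1, h2]
    have hA : dblLinearOldLoopA [1] 0 (m+1) = pvAIter (m+1) := by
      have h := pvLoopA_eq (m+1) 0
      simpa using h
    have hB : dblLinearOldLoopB [1] 0 0 m = (pvBIter m).1 := by
      have h := pvLoopB_eq m 0
      simpa using h
    rw [hA, hB, PySem.List.pyGetD_natCast, PySem.List.pyGetD_natCast]
    rw [(pvAInv_all (m+1)).2.2.1 m (by omega), (pvBInv_all m).1, pvGetDMapRange _ _ _ (by omega)]
  · have hneg : n = -1 := by
      unfold Pre_dbl_linear_old at hpre
      omega
    subst hneg
    decide
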